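-- pv_equiv track=rewrite | github.com/pypi-data/pypi-mirror-404 | packages/aiptx/aiptx-4.0.0-py3-none-any.whl/aipt_v2/stealth/obfuscation/bash_obfusc.py | use_brace_expansion
-- ===== SOURCE A (Python) =====
-- def use_brace_expansion(command: str) -> str:
--     """
--     Use brace expansion for strings.
--
--     Args:
--         command: Command to obfuscate
--
--     Returns:
--         Command with brace expansion
--     """
--     # Convert strings to brace expansion
--     # e.g., "cat" -> {c,a,t}
--     keywords = ["wget", "curl", "bash", "python"]
--
--     result = command
--     for keyword in keywords:
--         if keyword in result:
--             expanded = "{" + ",".join(keyword) + "}"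
--             result = result.replace(keyword, f"$(echo {expanded})")
--
--     return result
-- ===== SOURCE B (Python) =====
-- import re
--
-- _PATTERN = re.compile("wget|curl|bash|python")
--
--
-- def _expand(m):
--     return "$(echo {" + ",".join(m.group()) + "})"
--
--
-- def use_brace_expansion(command: str) -> str:
--     """Single left-to-right regex pass replacing each keyword occurrence."""
--     return _PATTERN.sub(_expand, command)
-- ===== Notes on version B (the rewrite author's own statement) =====
-- stated objective: idiomatic
-- what changed: B replaces A's four sequential whole-string .replace passes with one precompiled alternation regex and a single left-to-right re.sub pass using a replacement callback.
import Mathlib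
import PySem

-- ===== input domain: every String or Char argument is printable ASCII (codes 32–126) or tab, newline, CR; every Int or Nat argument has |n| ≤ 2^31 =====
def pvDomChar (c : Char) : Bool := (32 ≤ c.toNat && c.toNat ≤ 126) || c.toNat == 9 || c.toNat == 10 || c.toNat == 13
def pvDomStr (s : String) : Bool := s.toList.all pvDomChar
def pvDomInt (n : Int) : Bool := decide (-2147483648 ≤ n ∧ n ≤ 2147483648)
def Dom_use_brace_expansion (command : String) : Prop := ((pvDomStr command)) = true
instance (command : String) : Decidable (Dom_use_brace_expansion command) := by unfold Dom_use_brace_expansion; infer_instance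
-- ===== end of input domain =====

-- B replaces A's four sequential whole-string replace passes by one left-to-right scan
-- that rewrites each keyword occurrence in positional order (port of a regex-sub pass).

-- ===== PORT A =====
def use_brace_expansion (command : String) : String :=
  (["wget", "curl", "bash", "python"]).foldl
    (fun result keyword =>
      if PySem.Str.isIn keyword result = true then
        PySem.Str.replace result keyword
          ("$(echo " ++ ("{" ++ PySem.Str.join "," (keyword.toList.map (fun c => String.ofList [c])) ++ "}") ++ ")")
      else result)
    command

-- ===== PORT B =====
def bRepl (kw : List Char) : List Char :=
  "$(echo {".toList ++ List.intersperse ',' kw ++ "})".toList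

def bScan : List Char → List Char
  | [] => []
  | c :: t =>
    if "wget".toList.isPrefixOf (c :: t) then bRepl "wget".toList ++ bScan (t.drop 3)
    else if "curl".toList.isPrefixOf (c :: t) then bRepl "curl".toList ++ bScan (t.drop 3)
    else if "bash".toList.isPrefixOf (c :: t) then bRepl "bash".toList ++ bScan (t.drop 3)
    else if "python".toList.isPrefixOf (c :: t) then bRepl "python".toList ++ bScan (t.drop 5)
    else c :: bScan t
termination_by l => l.length
decreasing_by all_goals simp [List.length_drop]

def use_brace_expansion_alt (command : String) : String :=
  String.ofList (bScan command.toList)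

-- ===== PRECONDITION & SPEC =====
def Spec_use_brace_expansion (command : String) (out : String) : Prop := out = use_brace_expansion_alt command
instance (command : String) (out : String) : Decidable (Spec_use_brace_expansion command out) := by unfold Spec_use_brace_expansion; infer_instance

-- ===== CLAIM (what is proved, stated in full; the proofs are below) =====
def Claim_equal_use_brace_expansion : Prop := ∀ (command : String), Dom_use_brace_expansion command → Spec_use_brace_expansion command (use_brace_expansion command)

-- ===== LEMMAS AND PROOFS =====

-- proof-side model of Python str.replace (used for old ≠ []), structural on the list
def replaceL (old new : List Char) : List Char → List Char
  | [] => []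
  | c :: t =>
    if old.isPrefixOf (c :: t) then new ++ replaceL old new (t.drop (old.length - 1))
    else c :: replaceL old new t
termination_by l => l.length
decreasing_by all_goals simp [List.length_drop]

theorem replaceL_notin (old new : List Char) :
    ∀ l, ¬ old <:+: l → replaceL old new l = l := by
  intro l
  induction l with
  | nil => intro _; simp [replaceL]
  | cons c t ih =>
    intro hn
    rw [replaceL, if_neg, ih (fun hi => hn (List.infix_cons hi))]
    intro hp
    exact hn (List.isPrefixOf_iff_prefix.mp hp).isInfix

def NoCross (X k : List Char) : Bool :=
  (List.range X.length).all
    (fun i => !((X.drop i).isPrefixOf k) && !(k.isPrefixOf (X.drop i)))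

theorem noCross_spec {X k : List Char} (h : NoCross X k = true) :
    ∀ i < X.length, ¬ (X.drop i <+: k) ∧ ¬ (k <+: X.drop i) := by
  intro i hi
  simp only [NoCross, List.all_eq_true, List.mem_range] at h
  have := h i hi
  simp only [Bool.and_eq_true, Bool.not_eq_eq_eq_not, Bool.not_true] at this
  exact ⟨fun hx => by simp [List.isPrefixOf_iff_prefix.mpr hx] at this,
         fun hx => by simp [List.isPrefixOf_iff_prefix.mpr hx] at this⟩

theorem replaceL_pushP (k r : List Char) :
    ∀ X, (∀ i < X.length, ¬ (X.drop i <+: k) ∧ ¬ (k <+: X.drop i)) →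
      ∀ u, replaceL k r (X ++ u) = X ++ replaceL k r u := by
  intro X
  induction X with
  | nil => intro _ u; simp
  | cons x X' ih =>
    intro hX u
    have h0 := hX 0 (by simp)
    simp only [List.drop_zero] at h0
    have hne : ¬ k.isPrefixOf (x :: (X' ++ u)) = true := by
      rw [List.isPrefixOf_iff_prefix]
      intro hk
      rcases List.prefix_or_prefix_of_prefix hk (by
        show (x :: X') <+: (x :: X') ++ u; exact List.prefix_append _ _) with h | h
      · exact h0.2 h
      · exact h0.1 h
    have hX' : ∀ i < X'.length, ¬ (X'.drop i <+: k) ∧ ¬ (k <+: X'.drop i) := by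
      intro i hi
      have := hX (i + 1) (by simpa using Nat.succ_lt_succ hi)
      simpa [List.drop_succ_cons] using this
    rw [List.cons_append, replaceL, if_neg hne, ih hX' u, List.cons_append]

theorem replaceL_push (k r X : List Char) (h : NoCross X k = true) :
    ∀ u, replaceL k r (X ++ u) = X ++ replaceL k r u :=
  replaceL_pushP k r X (noCross_spec h)

theorem replaceL_head (k X : List Char) (hk : k ≠ []) (u : List Char) :
    replaceL k X (k ++ u) = X ++ replaceL k X u := by
  cases k with
  | nil => exact absurd rfl hk
  | cons c k' =>
    rw [List.cons_append, replaceL, if_pos]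
    · simp
    · rw [List.isPrefixOf_iff_prefix, ← List.cons_append]
      exact List.prefix_append _ _

def NoNew (p X : List Char) : Bool :=
  decide (p.length ≤ X.length) && (List.range p.length).all (fun i => !((p.drop i).isPrefixOf X))

theorem noNew_spec {p X : List Char} (h : NoNew p X = true) :
    p.length ≤ X.length ∧ ∀ i < p.length, ¬ (p.drop i <+: X) := by
  simp only [NoNew, Bool.and_eq_true, decide_eq_true_eq, List.all_eq_true, List.mem_range] at h
  refine ⟨h.1, fun i hi => ?_⟩
  have := h.2 i hi
  simp only [Bool.not_eq_eq_eq_not, Bool.not_true] at this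
  exact fun hx => by simp [List.isPrefixOf_iff_prefix.mpr hx] at this

theorem nonew_pref (p k X : List Char) (h : p.length ≤ X.length ∧ ∀ i < p.length, ¬ (p.drop i <+: X)) :
    ∀ n, ∀ l : List Char, l.length ≤ n → ∀ i, p.drop i <+: replaceL k X l → p.drop i <+: l := by
  intro n
  induction n with
  | zero =>
    intro l hl i hp
    have : l = [] := List.eq_nil_of_length_eq_zero (Nat.le_zero.mp hl)
    subst this
    simpa [replaceL] using hp
  | succ n ih =>
    intro l hl i hp
    cases l with
    | nil => simpa [replaceL] using hp
    | cons c t =>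
      rw [replaceL] at hp
      by_cases hm : k.isPrefixOf (c :: t) = true
      · rw [if_pos hm] at hp
        have hnil : p.drop i = [] := by
          by_contra hne
          have hi : i < p.length := by
            by_contra hge
            exact hne (List.drop_eq_nil_of_le (Nat.le_of_not_lt hge))
          rcases List.prefix_or_prefix_of_prefix hp
            (List.prefix_append X _) with hx | hx
          · exact h.2 i hi hx
          · -- X <+: p.drop i, but |p.drop i| ≤ |p| ≤ |X|: so they are equal
            have hlen2 : (p.drop i).length ≤ X.length := by
              have h1 := h.1
              simp only [List.length_drop]
              omega
            have : X = p.drop i := hx.eq_of_length_le hlen2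
            exact h.2 i hi (this ▸ List.prefix_refl _)
        rw [hnil]
        exact List.nil_prefix
      · rw [if_neg hm] at hp
        cases hq : p.drop i with
        | nil => exact hq ▸ List.nil_prefix
        | cons d q' =>
          rw [hq] at hp
          rcases (List.cons_prefix_cons).mp hp with ⟨hd, hq'⟩
          have hq'' : q' = p.drop (i + 1) := by
            rw [← List.tail_drop, hq]; rfl
          have := ih t (by simp at hl; omega) (i + 1) (hq'' ▸ hq')
          exact (List.cons_prefix_cons).mpr ⟨hd, hq'' ▸ this⟩

theorem nonew (p k X : List Char) (h : NoNew p X = true) (l : List Char)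
    (hp : p <+: replaceL k X l) : p <+: l := by
  have := nonew_pref p k X (noNew_spec h) l.length l le_rfl 0 (by simpa using hp)
  simpa using this

theorem go_eq (old new : List Char) (h : old ≠ []) :
    ∀ fuel (l acc : List Char), l.length ≤ fuel →
      PySem.Chars.replace.go old new fuel l acc = acc.reverse ++ replaceL old new l := by
  intro fuel
  induction fuel with
  | zero =>
    intro l acc hl
    have : l = [] := List.eq_nil_of_length_eq_zero (Nat.le_zero.mp hl)
    subst this
    simp [PySem.Chars.replace.go, replaceL]
  | succ n ih =>
    intro l acc hl
    cases l with
    | nil => simp [PySem.Chars.replace.go, replaceL]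
    | cons c t =>
      rw [PySem.Chars.replace.go]
      by_cases hm : old.isPrefixOf (c :: t) = true
      · rw [if_pos hm]
        cases old with
        | nil => exact absurd rfl h
        | cons o o' =>
          have hdrop : List.drop (o :: o').length (c :: t) = t.drop ((o :: o').length - 1) := by
            simp
          rw [hdrop, ih _ _ (by simp at hl ⊢; omega)]
          rw [replaceL, if_pos hm]
          simp
      · rw [if_neg hm, ih _ _ (by simp at hl ⊢; omega)]
        rw [replaceL, if_neg hm]
        simp

theorem replace_eq (l old new : List Char) (h : old ≠ []) :
    PySem.Chars.replace l old new = replaceL old new l := by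
  rw [PySem.Chars.replace, if_neg (by simpa [List.isEmpty_iff] using h)]
  simpa using go_eq old new h l.length l [] le_rfl

theorem bScan_wget (u : List Char) :
    bScan ("wget".toList ++ u) = bRepl "wget".toList ++ bScan u := by
  show bScan ('w'::'g'::'e'::'t'::u) = _
  rw [bScan, if_pos (by simp [List.isPrefixOf])]
  simp

theorem bScan_curl (u : List Char) :
    bScan ("curl".toList ++ u) = bRepl "curl".toList ++ bScan u := by
  show bScan ('c'::'u'::'r'::'l'::u) = _
  rw [bScan, if_neg (by simp [List.isPrefixOf]), if_pos (by simp [List.isPrefixOf])]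
  simp

theorem bScan_bash (u : List Char) :
    bScan ("bash".toList ++ u) = bRepl "bash".toList ++ bScan u := by
  show bScan ('b'::'a'::'s'::'h'::u) = _
  rw [bScan, if_neg (by simp [List.isPrefixOf]), if_neg (by simp [List.isPrefixOf]),
    if_pos (by simp [List.isPrefixOf])]
  simp

theorem bScan_python (u : List Char) :
    bScan ("python".toList ++ u) = bRepl "python".toList ++ bScan u := by
  show bScan ('p'::'y'::'t'::'h'::'o'::'n'::u) = _
  rw [bScan, if_neg (by simp [List.isPrefixOf]), if_neg (by simp [List.isPrefixOf]),
    if_neg (by simp [List.isPrefixOf]), if_pos (by simp [List.isPrefixOf])]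
  simp

theorem chain_eq : ∀ n, ∀ l : List Char, l.length ≤ n →
    replaceL "python".toList (bRepl "python".toList)
      (replaceL "bash".toList (bRepl "bash".toList)
        (replaceL "curl".toList (bRepl "curl".toList)
          (replaceL "wget".toList (bRepl "wget".toList) l))) = bScan l := by
  intro n
  induction n with
  | zero =>
    intro l hl
    have : l = [] := List.eq_nil_of_length_eq_zero (Nat.le_zero.mp hl)
    subst this
    simp [replaceL, bScan]
  | succ n ih =>
    intro l hl
    by_cases hW : "wget".toList.isPrefixOf l = true
    · obtain ⟨u, hu⟩ := List.isPrefixOf_iff_prefix.mp hW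
      subst hu
      rw [replaceL_head _ _ (by decide) u,
        replaceL_push _ _ _ (by decide) _,
        replaceL_push _ _ _ (by decide) _,
        replaceL_push _ _ _ (by decide) _,
        bScan_wget, ih u (by simp at hl; omega)]
    · by_cases hC : "curl".toList.isPrefixOf l = true
      · obtain ⟨u, hu⟩ := List.isPrefixOf_iff_prefix.mp hC
        subst hu
        rw [replaceL_push _ _ _ (by decide) _,
          replaceL_head _ _ (by decide) _,
          replaceL_push _ _ _ (by decide) _,
          replaceL_push _ _ _ (by decide) _,
          bScan_curl, ih u (by simp at hl; omega)]
      · by_cases hB : "bash".toList.isPrefixOf l = true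
        · obtain ⟨u, hu⟩ := List.isPrefixOf_iff_prefix.mp hB
          subst hu
          rw [replaceL_push _ _ _ (by decide) _,
            replaceL_push _ _ _ (by decide) _,
            replaceL_head _ _ (by decide) _,
            replaceL_push _ _ _ (by decide) _,
            bScan_bash, ih u (by simp at hl; omega)]
        · by_cases hP : "python".toList.isPrefixOf l = true
          · obtain ⟨u, hu⟩ := List.isPrefixOf_iff_prefix.mp hP
            subst hu
            rw [replaceL_push _ _ _ (by decide) _,
              replaceL_push _ _ _ (by decide) _,
              replaceL_push _ _ _ (by decide) _,
              replaceL_head _ _ (by decide) _,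
              bScan_python, ih u (by simp at hl; omega)]
          · cases l with
            | nil => simp [replaceL, bScan]
            | cons c t =>
              have s1 : replaceL "wget".toList (bRepl "wget".toList) (c :: t)
                  = c :: replaceL "wget".toList (bRepl "wget".toList) t := by
                rw [replaceL, if_neg hW]
              have hC2 : ¬ "curl".toList.isPrefixOf
                  (c :: replaceL "wget".toList (bRepl "wget".toList) t) = true := by
                intro hx
                have : "curl".toList <+: replaceL "wget".toList (bRepl "wget".toList) (c :: t) := by
                  rw [s1]; exact List.isPrefixOf_iff_prefix.mp hx
                exact hC (List.isPrefixOf_iff_prefix.mpr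
                  (nonew _ _ _ (by decide) _ this))
              have s2 : replaceL "curl".toList (bRepl "curl".toList)
                    (c :: replaceL "wget".toList (bRepl "wget".toList) t)
                  = c :: replaceL "curl".toList (bRepl "curl".toList)
                      (replaceL "wget".toList (bRepl "wget".toList) t) := by
                rw [replaceL, if_neg hC2]
              have hB2 : ¬ "bash".toList.isPrefixOf
                  (c :: replaceL "curl".toList (bRepl "curl".toList)
                    (replaceL "wget".toList (bRepl "wget".toList) t)) = true := by
                intro hx
                have : "bash".toList <+: replaceL "curl".toList (bRepl "curl".toList)
                    (replaceL "wget".toList (bRepl "wget".toList) (c :: t)) := by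
                  rw [s1, s2]; exact List.isPrefixOf_iff_prefix.mp hx
                exact hB (List.isPrefixOf_iff_prefix.mpr
                  (nonew _ _ _ (by decide) _ (nonew _ _ _ (by decide) _ this)))
              have s3 : replaceL "bash".toList (bRepl "bash".toList)
                    (c :: replaceL "curl".toList (bRepl "curl".toList)
                      (replaceL "wget".toList (bRepl "wget".toList) t))
                  = c :: replaceL "bash".toList (bRepl "bash".toList)
                      (replaceL "curl".toList (bRepl "curl".toList)
                        (replaceL "wget".toList (bRepl "wget".toList) t)) := by
                rw [replaceL, if_neg hB2]
              have hP2 : ¬ "python".toList.isPrefixOf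
                  (c :: replaceL "bash".toList (bRepl "bash".toList)
                    (replaceL "curl".toList (bRepl "curl".toList)
                      (replaceL "wget".toList (bRepl "wget".toList) t))) = true := by
                intro hx
                have : "python".toList <+: replaceL "bash".toList (bRepl "bash".toList)
                    (replaceL "curl".toList (bRepl "curl".toList)
                      (replaceL "wget".toList (bRepl "wget".toList) (c :: t))) := by
                  rw [s1, s2, s3]; exact List.isPrefixOf_iff_prefix.mp hx
                exact hP (List.isPrefixOf_iff_prefix.mpr
                  (nonew _ _ _ (by decide) _ (nonew _ _ _ (by decide) _
                    (nonew _ _ _ (by decide) _ this))))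
              have s4 : replaceL "python".toList (bRepl "python".toList)
                    (c :: replaceL "bash".toList (bRepl "bash".toList)
                      (replaceL "curl".toList (bRepl "curl".toList)
                        (replaceL "wget".toList (bRepl "wget".toList) t)))
                  = c :: replaceL "python".toList (bRepl "python".toList)
                      (replaceL "bash".toList (bRepl "bash".toList)
                        (replaceL "curl".toList (bRepl "curl".toList)
                          (replaceL "wget".toList (bRepl "wget".toList) t))) := by
                rw [replaceL, if_neg hP2]
              rw [s1, s2, s3, s4, bScan, if_neg hW, if_neg hC, if_neg hB, if_neg hP,
                ih t (by simp at hl; omega)]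

theorem step_eq (kw X : String) (hk : kw.toList ≠ []) (t : String) :
    (if PySem.Str.isIn kw t = true then PySem.Str.replace t kw X else t)
      = String.ofList (replaceL kw.toList X.toList t.toList) := by
  by_cases hin : PySem.Str.isIn kw t = true
  · rw [if_pos hin]
    show String.ofList (PySem.Chars.replace t.toList kw.toList X.toList) = _
    rw [replace_eq _ _ _ hk]
  · rw [if_neg hin]
    have hni : ¬ kw.toList <:+: t.toList := by
      rw [← PySem.Str.isIn_iff_infix]; exact hin
    rw [replaceL_notin kw.toList X.toList t.toList hni]
    simp

theorem repl_wget : ("$(echo " ++ ("{" ++ PySem.Str.join "," ("wget".toList.map (fun c => String.ofList [c])) ++ "}") ++ ")" : String).toList = bRepl "wget".toList := by decide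
theorem repl_curl : ("$(echo " ++ ("{" ++ PySem.Str.join "," ("curl".toList.map (fun c => String.ofList [c])) ++ "}") ++ ")" : String).toList = bRepl "curl".toList := by decide
theorem repl_bash : ("$(echo " ++ ("{" ++ PySem.Str.join "," ("bash".toList.map (fun c => String.ofList [c])) ++ "}") ++ ")" : String).toList = bRepl "bash".toList := by decide
theorem repl_python : ("$(echo " ++ ("{" ++ PySem.Str.join "," ("python".toList.map (fun c => String.ofList [c])) ++ "}") ++ ")" : String).toList = bRepl "python".toList := by decide

-- ===== VERDICT (by name: the statement is the Claim_ definition above) =====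
theorem use_brace_expansion_spec : Claim_equal_use_brace_expansion := by
  intro s _
  unfold Spec_use_brace_expansion
  unfold use_brace_expansion use_brace_expansion_alt
  simp only [List.foldl]
  rw [step_eq _ _ (by decide) s]
  rw [step_eq _ _ (by decide) _]
  rw [step_eq _ _ (by decide) _]
  rw [step_eq _ _ (by decide) _]
  simp only [String.toList_ofList]
  rw [repl_wget, repl_curl, repl_bash, repl_python]
  rw [chain_eq s.toList.length s.toList le_rfl]
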